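-- pv_equiv track=rewrite | github.com/rntk/rsstag | rsstag/post_splitter.py | _build_sentence_bounds
-- ===== SOURCE A (Python) =====
-- from typing import Optional, List, Dict, Any, Tuple
--
-- def _build_sentence_bounds(
--     coord_map: Dict[Tuple[int, int], int]
-- ) -> Dict[int, Tuple[int, int]]:
--     """Build sentence start/end word-index bounds from a coordinate map."""
--     sentence_bounds: Dict[int, Tuple[int, int]] = {}
--     for (y, _), linear_idx in coord_map.items():
--         if y not in sentence_bounds:
--             sentence_bounds[y] = (linear_idx, linear_idx)
--         else:
--             start_idx, end_idx = sentence_bounds[y]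
--             sentence_bounds[y] = (
--                 min(start_idx, linear_idx),
--                 max(end_idx, linear_idx),
--             )
--     return sentence_bounds
-- ===== SOURCE B (Python) =====
-- from collections import defaultdict
-- from typing import Dict, Tuple
--
--
-- def _build_sentence_bounds(
--     coord_map: Dict[Tuple[int, int], int]
-- ) -> Dict[int, Tuple[int, int]]:
--     """Group linear indices by sentence, then reduce each group to (min, max)."""
--     grouped = defaultdict(list)
--     for (y, _), linear_idx in coord_map.items():
--         grouped[y].append(linear_idx)
--     return {y: (min(lst), max(lst)) for y, lst in grouped.items()}
-- ===== Notes on version B (the rewrite author's own statement) =====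
-- stated objective: alternative
-- what changed: Replaces the running min/max bounds maintained during the single scan by a two-phase group-then-reduce: first collect all linear indices per sentence into a defaultdict of lists, then build the result with a dict comprehension taking min and max of each group.
import Mathlib
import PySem

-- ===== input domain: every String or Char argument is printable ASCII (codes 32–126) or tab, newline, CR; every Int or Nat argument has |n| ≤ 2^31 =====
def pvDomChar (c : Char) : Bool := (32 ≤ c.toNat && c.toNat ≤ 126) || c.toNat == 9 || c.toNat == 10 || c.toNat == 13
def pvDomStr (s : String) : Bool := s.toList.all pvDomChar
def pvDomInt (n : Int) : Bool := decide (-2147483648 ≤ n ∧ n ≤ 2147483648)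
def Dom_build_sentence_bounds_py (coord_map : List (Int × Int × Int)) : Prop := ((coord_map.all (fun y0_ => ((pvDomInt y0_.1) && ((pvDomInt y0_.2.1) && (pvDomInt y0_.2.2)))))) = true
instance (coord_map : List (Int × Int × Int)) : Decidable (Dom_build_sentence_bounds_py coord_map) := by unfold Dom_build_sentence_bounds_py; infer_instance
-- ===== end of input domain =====

-- B replaces A's running min/max accumulator by a two-phase group-then-reduce (collect index lists per sentence, then take min/max of each); alternative decomposition, same cost.


-- ===== PORT A =====
-- the loop body: insert (idx, idx) for an unseen sentence, else widen the running bounds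
def pvStepA (sb : PySem.Dict Int (Int × Int)) (t : Int × Int × Int) : PySem.Dict Int (Int × Int) :=
  match sb.get? t.1 with
  | none => sb.insert t.1 (t.2.2, t.2.2)
  | some (s, e) => sb.insert t.1 (min s t.2.2, max e t.2.2)

def build_sentence_bounds_py (coord_map : List (Int × Int × Int)) : List (Int × Int × Int) :=
  ((coord_map.foldl pvStepA PySem.Dict.empty).items).map (fun p => (p.1, p.2.1, p.2.2))

-- ===== PORT B =====
-- phase one: defaultdict(list) grouping of linear indices by sentence index y
def pvGroup (coord_map : List (Int × Int × Int)) : PySem.Dict Int (List Int) :=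
  coord_map.foldl (fun d t => d.modify t.1 [] (fun xs => xs ++ [t.2.2])) PySem.Dict.empty

-- phase two: dict comprehension {y: (min(lst), max(lst))}; the lists are nonempty, so getD 0 is never used
def build_sentence_bounds_py_alt (coord_map : List (Int × Int × Int)) : List (Int × Int × Int) :=
  (pvGroup coord_map).items.map (fun p =>
    (p.1, (PySem.List.min? p.2 (fun y => y)).getD 0, (PySem.List.max? p.2 (fun y => y)).getD 0))

-- ===== PRECONDITION & SPEC =====
def Spec_build_sentence_bounds_py (coord_map : List (Int × Int × Int)) (out : List (Int × Int × Int)) : Prop := out = build_sentence_bounds_py_alt coord_map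
instance (coord_map : List (Int × Int × Int)) (out : List (Int × Int × Int)) : Decidable (Spec_build_sentence_bounds_py coord_map out) := by unfold Spec_build_sentence_bounds_py; infer_instance

-- ===== CLAIM (what is proved, stated in full; the proofs are below) =====
def Claim_equal_build_sentence_bounds_py : Prop := ∀ (coord_map : List (Int × Int × Int)), Dom_build_sentence_bounds_py coord_map → Spec_build_sentence_bounds_py coord_map (build_sentence_bounds_py coord_map)

-- ===== LEMMAS AND PROOFS =====

-- A's step written as a single insert of an "extend the optional bounds" value
def pvExtend (o : Option (Int × Int)) (v : Int) : Int × Int :=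
  match o with
  | none => (v, v)
  | some p => (min p.1 v, max p.2 v)

theorem pvStepA_eq (sb : PySem.Dict Int (Int × Int)) (t : Int × Int × Int) :
    pvStepA sb t = sb.insert t.1 (pvExtend (sb.get? t.1) t.2.2) := by
  unfold pvStepA pvExtend
  cases sb.get? t.1 with
  | none => rfl
  | some p => rfl

theorem pvFoldA_eq (l : List (Int × Int × Int)) (d : PySem.Dict Int (Int × Int)) :
    l.foldl pvStepA d = l.foldl (fun d t => d.insert t.1 (pvExtend (d.get? t.1) t.2.2)) d := by
  induction l generalizing d with
  | nil => rfl
  | cons t l ih => simp only [List.foldl_cons, pvStepA_eq, ih]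

theorem pvGet?_foldA (l : List (Int × Int × Int)) (d : PySem.Dict Int (Int × Int)) (k : Int) :
    (l.foldl (fun d t => d.insert t.1 (pvExtend (d.get? t.1) t.2.2)) d).get? k =
      ((l.filter (fun t => t.1 == k)).map (fun t => t.2.2)).foldl
        (fun o v => some (pvExtend o v)) (d.get? k) := by
  induction l generalizing d with
  | nil => rfl
  | cons t l ih =>
    simp only [List.foldl_cons, List.filter_cons]
    by_cases h : t.1 = k
    · subst h
      simp only [BEq.rfl, if_pos trivial, List.map_cons, List.foldl_cons, ih,
        PySem.Dict.get?_insert_self]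
    · have hb : (t.1 == k) = false := by simpa using h
      rw [hb]
      simp only [Bool.false_eq_true, if_false, ih,
        PySem.Dict.get?_insert_of_ne d _ (Ne.symm h)]

theorem pvFoldExtend_some (t : List Int) (p : Int × Int) :
    t.foldl (fun o v => some (pvExtend o v)) (some p) =
      some (t.foldl (fun p v => (min p.1 v, max p.2 v)) p) := by
  induction t generalizing p with
  | nil => rfl
  | cons v t ih =>
    rw [List.foldl_cons, List.foldl_cons]
    exact ih (pvExtend (some p) v)

theorem pvPairFold (t : List Int) (a b : Int) :
    t.foldl (fun p v => (min p.1 v, max p.2 v)) (a, b) = (t.foldl min a, t.foldl max b) := by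
  induction t generalizing a b with
  | nil => rfl
  | cons v t ih => simp only [List.foldl_cons, ih]

theorem pvGroup_getD (l : List (Int × Int × Int)) (k : Int) :
    (pvGroup l).getD k [] = (l.filter (fun t => t.1 == k)).map (fun t => t.2.2) := by
  unfold pvGroup
  have hm : l.foldl (fun d t => d.modify t.1 [] (fun xs => xs ++ [t.2.2])) PySem.Dict.empty =
      (l.map (fun t => (t.1, t.2.2))).foldl (fun d p => d.modify p.1 [] (fun xs => xs ++ [p.2]))
        PySem.Dict.empty := by
    rw [List.foldl_map]
  rw [hm, PySem.Dict.getD_foldl_modify_append, PySem.Dict.getD_empty, List.nil_append,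
    List.filter_map, List.map_map]
  rfl

theorem pvKeysA (l : List (Int × Int × Int)) :
    (l.foldl pvStepA PySem.Dict.empty).keys = PySem.Set.update [] (l.map (fun t => t.1)) := by
  rw [pvFoldA_eq]
  have := PySem.Dict.keys_foldl_insert_key l (fun t => t.1)
    (fun d t => pvExtend (d.get? t.1) t.2.2) PySem.Dict.empty
  simpa [PySem.Dict.keys_empty] using this

theorem pvKeysB (l : List (Int × Int × Int)) :
    (pvGroup l).keys = PySem.Set.update [] (l.map (fun t => t.1)) := by
  unfold pvGroup
  have := PySem.Dict.keys_foldl_modify_key l (fun t => t.1) []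
    (fun d t => fun xs => xs ++ [t.2.2]) PySem.Dict.empty
  simpa [PySem.Dict.keys_empty] using this

theorem pvNodupB (l : List (Int × Int × Int)) : (pvGroup l).keys.Nodup := by
  unfold pvGroup
  exact PySem.Dict.nodup_keys_foldl_modify_key l (fun t => t.1) []
    (fun d t => fun xs => xs ++ [t.2.2]) PySem.Dict.empty
    (by simp [PySem.Dict.keys_empty])

theorem pvNodupA (l : List (Int × Int × Int)) : (l.foldl pvStepA PySem.Dict.empty).keys.Nodup := by
  rw [pvKeysA, ← pvKeysB]; exact pvNodupB l

theorem pvMem_update_nil (xs : List Int) (y : Int) :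
    y ∈ PySem.Set.update [] xs ↔ y ∈ xs := by
  have h : PySem.Set.update ([] : PySem.Set Int) xs = PySem.Set.ofList xs := rfl
  rw [h, PySem.Set.mem_ofList]

-- ===== VERDICT (by name: the statement is the Claim_ definition above) =====
theorem build_sentence_bounds_py_spec : Claim_equal_build_sentence_bounds_py := by
  intro coord_map _
  show build_sentence_bounds_py coord_map = build_sentence_bounds_py_alt coord_map
  unfold build_sentence_bounds_py build_sentence_bounds_py_alt
  rw [PySem.Dict.items_eq_map_keys _ (pvNodupA coord_map) (0, 0),
      PySem.Dict.items_eq_map_keys _ (pvNodupB coord_map) [],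
      List.map_map, List.map_map, pvKeysA, pvKeysB]
  apply List.map_congr_left
  intro k hk
  have hkmem : k ∈ coord_map.map (fun t => t.1) := (pvMem_update_nil _ k).mp hk
  -- the group of k is nonempty
  have hg : (coord_map.filter (fun t => t.1 == k)).map (fun t => t.2.2) ≠ [] := by
    obtain ⟨t, ht, hk1⟩ := List.mem_map.mp hkmem
    intro hnil
    have : t ∈ coord_map.filter (fun t => t.1 == k) :=
      List.mem_filter.mpr ⟨ht, by simp [hk1]⟩
    rw [List.map_eq_nil_iff.mp hnil] at this
    exact absurd this (List.not_mem_nil)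
  obtain ⟨v, g, hvg⟩ := List.exists_cons_of_ne_nil hg
  -- A's value at k
  have hA : (coord_map.foldl pvStepA PySem.Dict.empty).getD k (0, 0) =
      (g.foldl min v, g.foldl max v) := by
    unfold PySem.Dict.getD
    rw [pvFoldA_eq, pvGet?_foldA, PySem.Dict.get?_empty, hvg, List.foldl_cons]
    have h0 : pvExtend none v = (v, v) := rfl
    rw [h0, pvFoldExtend_some, pvPairFold, Option.getD_some]
  -- B's value at k
  have hB : (pvGroup coord_map).getD k [] = v :: g := by rw [pvGroup_getD, hvg]
  simp only [Function.comp, hA, hB, PySem.List.min?_id_cons, PySem.List.max?_id_cons,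
    Option.getD_some]
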